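-- pv_equiv track=rewrite | github.com/ICE27182/Python-3D-renderer | rasterization.py | rasterize0
-- ===== SOURCE A (Python) =====
-- def rasterize0(A, B, C):
--     pos = (min(A[1], B[1], C[1]), max(A[1], B[1], C[1]) + 1, min(A[0], B[0], C[0]), max(A[0], B[0], C[0]) + 1)
--     out = [[0] * (pos[3] - pos[2]) for _ in range(pos[1] - pos[0])]
--     for y in range(pos[0], pos[1]):
--         for x in range(pos[2], pos[3]):
--             if (x, y) in (A, B, C):
--                 out[y - pos[0]][x - pos[2]] = 2
--                 continue
--             AP = (x - A[0], y - A[1])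
--             BP = (x - B[0], y - B[1])
--             CP = (x - C[0], y - C[1])
--             APxBP = AP[0] * BP[1] - AP[1] * BP[0]
--             BPxCP = BP[0] * CP[1] - BP[1] * CP[0]
--             CPxAP = CP[0] * AP[1] - CP[1] * AP[0]
--             if APxBP >= 0 and BPxCP >= 0 and CPxAP >= 0:
--                 out[y - pos[0]][x - pos[2]] = 1
--             else:
--                 out[y - pos[0]][x - pos[2]] = 0
--     return out
-- ===== SOURCE B (Python) =====
-- def _clamp(lo, hi, s, c):
--     # intersect [lo, hi] with the integer solutions of s*x + c >= 0
--     if s > 0: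
--         return max(lo, -(c // s)), hi
--     if s < 0:
--         return lo, min(hi, c // (-s))
--     if c < 0:
--         return hi + 1, hi
--     return lo, hi
--
-- def rasterize0(A, B, C):
--     y0 = min(A[1], B[1], C[1]); y1 = max(A[1], B[1], C[1]) + 1
--     x0 = min(A[0], B[0], C[0]); x1 = max(A[0], B[0], C[0]) + 1
--     # Each edge test (P->Q) is linear in x: slope*x + const(y) >= 0.
--     edges = ((A[1] - B[1], B[0] - A[0], A[0] * B[1] - A[1] * B[0]),
--              (B[1] - C[1], C[0] - B[0], B[0] * C[1] - B[1] * C[0]),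
--              (C[1] - A[1], A[0] - C[0], C[0] * A[1] - C[1] * A[0]))
--     out = []
--     for y in range(y0, y1):
--         lo, hi = x0, x1 - 1
--         for s, m, k in edges:
--             lo, hi = _clamp(lo, hi, s, y * m + k)
--         out.append([2 if (x, y) in (A, B, C) else (1 if lo <= x <= hi else 0)
--                     for x in range(x0, x1)])
--     return out
-- ===== Notes on version B (the rewrite author's own statement) =====
-- stated objective: alternative
-- what changed: Replaces A's per-pixel evaluation of three cross products with a scanline algorithm: each edge test is linear in x, so per row the three inequalities are solved once for a single contiguous x-interval (via integer floor division) and the row is emitted directly, with vertex cells overridden.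
import Mathlib
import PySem

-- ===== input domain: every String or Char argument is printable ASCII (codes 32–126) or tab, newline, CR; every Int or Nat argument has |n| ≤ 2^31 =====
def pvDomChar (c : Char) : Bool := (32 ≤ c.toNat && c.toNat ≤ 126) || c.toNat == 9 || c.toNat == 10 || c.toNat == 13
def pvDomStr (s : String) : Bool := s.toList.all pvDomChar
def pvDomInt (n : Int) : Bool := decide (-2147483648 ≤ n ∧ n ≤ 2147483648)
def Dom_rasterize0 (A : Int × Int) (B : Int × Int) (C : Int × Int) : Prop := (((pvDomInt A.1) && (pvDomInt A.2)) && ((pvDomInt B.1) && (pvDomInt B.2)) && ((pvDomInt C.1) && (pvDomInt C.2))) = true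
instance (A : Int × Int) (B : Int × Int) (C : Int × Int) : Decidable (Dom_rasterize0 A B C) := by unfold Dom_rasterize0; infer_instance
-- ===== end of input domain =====

-- B replaces A's per-pixel cross-product tests with a per-row (scanline) solve of the three
-- linear-in-x edge inequalities, filling one contiguous interval per row (objective: alternative).

-- ===== PORT A =====
def rasterize0 (A : Int × Int) (B : Int × Int) (C : Int × Int) : List (List Int) :=
  let pos : Int × Int × Int × Int :=
    (min (min A.2 B.2) C.2, max (max A.2 B.2) C.2 + 1,
     min (min A.1 B.1) C.1, max (max A.1 B.1) C.1 + 1)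
  let out : List (List Int) :=
    (PySem.List.pyRange 0 (pos.2.1 - pos.1) 1).map
      (fun _ => List.replicate (pos.2.2.2 - pos.2.2.1).toNat (0 : Int))
  (PySem.List.pyRange pos.1 pos.2.1 1).foldl (fun out y =>
    (PySem.List.pyRange pos.2.2.1 pos.2.2.2 1).foldl (fun out x =>
      if (x, y) = A ∨ (x, y) = B ∨ (x, y) = C then
        PySem.List.pySetD out (y - pos.1)
          (PySem.List.pySetD (PySem.List.pyGetD out (y - pos.1) []) (x - pos.2.2.1) 2)
      else
        let AP := (x - A.1, y - A.2)
        let BP := (x - B.1, y - B.2)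
        let CP := (x - C.1, y - C.2)
        let APxBP := AP.1 * BP.2 - AP.2 * BP.1
        let BPxCP := BP.1 * CP.2 - BP.2 * CP.1
        let CPxAP := CP.1 * AP.2 - CP.2 * AP.1
        if APxBP ≥ 0 ∧ BPxCP ≥ 0 ∧ CPxAP ≥ 0 then
          PySem.List.pySetD out (y - pos.1)
            (PySem.List.pySetD (PySem.List.pyGetD out (y - pos.1) []) (x - pos.2.2.1) 1)
        else
          PySem.List.pySetD out (y - pos.1)
            (PySem.List.pySetD (PySem.List.pyGetD out (y - pos.1) []) (x - pos.2.2.1) 0)) out) out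

-- ===== PORT B =====
def pvClamp (lo hi s c : Int) : Int × Int :=
  if s > 0 then (max lo (-(PySem.Int.floordiv c s)), hi)
  else if s < 0 then (lo, min hi (PySem.Int.floordiv c (-s)))
  else if c < 0 then (hi + 1, hi)
  else (lo, hi)

def rasterize0_alt (A : Int × Int) (B : Int × Int) (C : Int × Int) : List (List Int) :=
  let y0 := min (min A.2 B.2) C.2
  let y1 := max (max A.2 B.2) C.2 + 1
  let x0 := min (min A.1 B.1) C.1
  let x1 := max (max A.1 B.1) C.1 + 1
  let edges : List (Int × Int × Int) :=
    [(A.2 - B.2, B.1 - A.1, A.1 * B.2 - A.2 * B.1),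
     (B.2 - C.2, C.1 - B.1, B.1 * C.2 - B.2 * C.1),
     (C.2 - A.2, A.1 - C.1, C.1 * A.2 - C.2 * A.1)]
  (PySem.List.pyRange y0 y1 1).map (fun y =>
    let lh : Int × Int := edges.foldl (fun lh e => pvClamp lh.1 lh.2 e.1 (y * e.2.1 + e.2.2)) (x0, x1 - 1)
    (PySem.List.pyRange x0 x1 1).map (fun x =>
      if (x, y) = A ∨ (x, y) = B ∨ (x, y) = C then 2
      else if lh.1 ≤ x ∧ x ≤ lh.2 then 1 else 0))

-- ===== PRECONDITION & SPEC =====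
def Spec_rasterize0 (A : Int × Int) (B : Int × Int) (C : Int × Int) (out : List (List Int)) : Prop := out = rasterize0_alt A B C
instance (A : Int × Int) (B : Int × Int) (C : Int × Int) (out : List (List Int)) : Decidable (Spec_rasterize0 A B C out) := by unfold Spec_rasterize0; infer_instance

-- ===== CLAIM (what is proved, stated in full; the proofs are below) =====
def Claim_equal_rasterize0 : Prop := ∀ (A : Int × Int) (B : Int × Int) (C : Int × Int), Dom_rasterize0 A B C → Spec_rasterize0 A B C (rasterize0 A B C)

-- ===== LEMMAS AND PROOFS =====

-- the per-pixel value both programs assign at (x, y)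
def pvPix (A B C : Int × Int) (x y : Int) : Int :=
  if (x, y) = A ∨ (x, y) = B ∨ (x, y) = C then 2
  else if (x - A.1) * (y - B.2) - (y - A.2) * (x - B.1) ≥ 0 ∧
          (x - B.1) * (y - C.2) - (y - B.2) * (x - C.1) ≥ 0 ∧
          (x - C.1) * (y - A.2) - (y - C.2) * (x - A.1) ≥ 0 then 1 else 0

theorem pvClampStep (lo hi s c x : Int) :
    ((pvClamp lo hi s c).1 ≤ x ∧ x ≤ (pvClamp lo hi s c).2) ↔
    ((lo ≤ x ∧ x ≤ hi) ∧ s * x + c ≥ 0) := by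
  unfold pvClamp
  split_ifs with h1 h2 h3
  · rw [PySem.Int.floordiv_eq_ediv_of_pos h1]
    simp only [max_le_iff, neg_le, ge_iff_le]
    constructor
    · rintro ⟨⟨hl, hd⟩, hh⟩
      rw [Int.le_ediv_iff_mul_le h1] at hd
      exact ⟨⟨hl, hh⟩, by nlinarith⟩
    · rintro ⟨⟨hl, hh⟩, he⟩
      refine ⟨⟨hl, ?_⟩, hh⟩
      rw [Int.le_ediv_iff_mul_le h1]
      nlinarith
  · have hs : (0:Int) < -s := by omega
    rw [PySem.Int.floordiv_eq_ediv_of_pos hs]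
    simp only [le_min_iff, ge_iff_le]
    constructor
    · rintro ⟨hl, hh, hd⟩
      rw [Int.le_ediv_iff_mul_le hs] at hd
      exact ⟨⟨hl, hh⟩, by nlinarith⟩
    · rintro ⟨⟨hl, hh⟩, he⟩
      refine ⟨hl, hh, ?_⟩
      rw [Int.le_ediv_iff_mul_le hs]
      nlinarith
  · have : s = 0 := by omega
    subst this
    simp only [zero_mul, zero_add, ge_iff_le]
    omega
  · have : s = 0 := by omega
    subst this
    simp only [zero_mul, zero_add, ge_iff_le]
    omega

theorem pvRowFold_get (v : Int → Int) (x0 b : Int) :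
    ∀ (n : Nat) (a : Int) (row : List Int), (b - a).toNat = n → x0 ≤ a →
      b - x0 ≤ (row.length : Int) →
      ∀ k : Nat,
        ((PySem.List.pyRange a b 1).foldl
            (fun r x => PySem.List.pySetD r (x - x0) (v x)) row)[k]? =
          if a - x0 ≤ (k : Int) ∧ (k : Int) < b - x0 then some (v (x0 + k)) else row[k]? := by
  intro n
  induction n with
  | zero =>
    intro a row hn _ _ k
    rw [PySem.List.pyRange_one_eq_nil (by omega)]
    simp only [List.foldl_nil]
    rw [if_neg (by omega)]
  | succ m ih =>
    intro a row hn ha hlen k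
    rw [PySem.List.pyRange_one_cons (by omega), List.foldl_cons]
    rw [ih (a + 1) _ (by omega) (by omega)
        (by rw [PySem.List.length_pySetD]; omega) k]
    rw [PySem.List.pySetD_of_nonneg row (v a) (by omega)]
    rw [List.getElem?_set]
    split_ifs <;>
      first
        | rfl
        | (exfalso; omega)
        | exact congrArg (fun t => some (v t)) (by omega : a = x0 + (k : Int))

theorem pvInnerCollapse (i : Int) (hi : 0 ≤ i) (x0 : Int) (v : Int → Int) :
    ∀ (rng : List Int) (out : List (List Int)),
      rng.foldl (fun out x =>
          PySem.List.pySetD out i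
            (PySem.List.pySetD (PySem.List.pyGetD out i []) (x - x0) (v x))) out =
        PySem.List.pySetD out i
          (rng.foldl (fun r x => PySem.List.pySetD r (x - x0) (v x))
            (PySem.List.pyGetD out i [])) := by
  intro rng
  induction rng with
  | nil =>
    intro out
    simp only [List.foldl_nil]
    rw [PySem.List.pySetD_of_nonneg _ _ hi, PySem.List.pyGetD_of_nonneg _ _ hi]
    by_cases h : i.toNat < out.length
    · rw [List.getD_eq_getElem?_getD, List.getElem?_eq_getElem h]
      exact (List.set_getElem_self h).symm
    · rw [List.set_eq_of_length_le (by omega)]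
  | cons x rest ih =>
    intro out
    simp only [List.foldl_cons]
    rw [ih]
    rw [PySem.List.pySetD_of_nonneg out _ hi, PySem.List.pySetD_of_nonneg _ _ hi,
        PySem.List.pySetD_of_nonneg out _ hi]
    rw [List.set_set]
    congr 2
    -- pyGetD (out.set i.toNat r1) i [] = r1  (or [] = r1 when out of range)
    rw [PySem.List.pyGetD_of_nonneg _ _ hi]
    by_cases h : i.toNat < out.length
    · rw [List.getD_eq_getElem?_getD, List.getElem?_set_self (by omega)]
      rfl
    · rw [List.set_eq_of_length_le (by omega), List.getD_eq_getElem?_getD,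
          List.getElem?_eq_none (by omega)]
      rw [PySem.List.pyGetD_of_nonneg _ _ hi, List.getD_eq_getElem?_getD,
          List.getElem?_eq_none (by omega)]
      -- [] = pySetD [] (x - x0) (v x)
      simp only [Option.getD_none]
      simp only [PySem.List.pySetD, PySem.List.pySet?, PySem.List.pyIdx?]
      split_ifs <;> rfl

-- row fold from x0 on a fresh row is the mapped row
theorem pvRowFold_map (v : Int → Int) (x0 x1 : Int) :
    (PySem.List.pyRange x0 x1 1).foldl
        (fun r x => PySem.List.pySetD r (x - x0) (v x))
        (List.replicate (x1 - x0).toNat 0) =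
      (PySem.List.pyRange x0 x1 1).map v := by
  apply List.ext_getElem?
  intro k
  rw [pvRowFold_get v x0 x1 (x1 - x0).toNat x0 _ rfl le_rfl (by simp)]
  rw [List.getElem?_map, PySem.List.getElem?_pyRange_one]
  by_cases h : (k : Int) < x1 - x0
  · rw [if_pos (by omega), if_pos (by omega)]
    rfl
  · rw [if_neg (by omega), if_neg (by omega), List.getElem?_eq_none (by simp; omega)]
    rfl

theorem pvOuterFold_get (v2 : Int → Int → Int) (x0 x1 y0 b : Int) :
    ∀ (n : Nat) (a : Int) (out : List (List Int)), (b - a).toNat = n → y0 ≤ a →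
      (∀ r : Nat, a - y0 ≤ (r : Int) → (r : Int) < b - y0 →
        out[r]? = some (List.replicate (x1 - x0).toNat 0)) →
      ∀ r : Nat,
        ((PySem.List.pyRange a b 1).foldl (fun out y =>
            (PySem.List.pyRange x0 x1 1).foldl (fun out x =>
              PySem.List.pySetD out (y - y0)
                (PySem.List.pySetD (PySem.List.pyGetD out (y - y0) []) (x - x0) (v2 y x))) out)
          out)[r]? =
          if a - y0 ≤ (r : Int) ∧ (r : Int) < b - y0 then
            some ((PySem.List.pyRange x0 x1 1).map (v2 (y0 + r))) else out[r]? := by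
  intro n
  induction n with
  | zero =>
    intro a out hn _ _ r
    rw [show PySem.List.pyRange a b 1 = [] from PySem.List.pyRange_one_eq_nil (by omega)]
    simp only [List.foldl_nil]
    rw [if_neg (by omega)]
  | succ m ih =>
    intro a out hn ha hrows r
    rw [show PySem.List.pyRange a b 1 = a :: PySem.List.pyRange (a + 1) b 1 from
          PySem.List.pyRange_one_cons (by omega), List.foldl_cons]
    have hrow0 : PySem.List.pyGetD out (a - y0) [] = List.replicate (x1 - x0).toNat 0 := by
      rw [PySem.List.pyGetD_of_nonneg _ _ (by omega), List.getD_eq_getElem?_getD,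
          hrows (a - y0).toNat (by omega) (by omega)]
      rfl
    rw [pvInnerCollapse (a - y0) (by omega) x0 (v2 a), hrow0, pvRowFold_map,
        PySem.List.pySetD_of_nonneg _ _ (by omega)]
    have hlen : (a - y0).toNat < out.length := by
      have h := hrows (a - y0).toNat (by omega) (by omega)
      rw [List.getElem?_eq_some_iff] at h
      obtain ⟨h1, -⟩ := h
      exact h1
    rw [ih (a + 1) _ (by omega) (by omega) ?_ r]
    · rw [List.getElem?_set]
      split_ifs <;>
        first
          | rfl
          | (exfalso; omega)
          | (exact congrArg (fun t => some ((PySem.List.pyRange x0 x1 1).map (v2 t))) (by omega : a = y0 + (r : Int)))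
    · intro r' h1 h2
      rw [List.getElem?_set, if_neg (by omega)]
      exact hrows r' (by omega) h2

theorem pvA_eq_mid (A B C : Int × Int) :
    rasterize0 A B C =
      (PySem.List.pyRange (min (min A.2 B.2) C.2) (max (max A.2 B.2) C.2 + 1) 1).map (fun y =>
        (PySem.List.pyRange (min (min A.1 B.1) C.1) (max (max A.1 B.1) C.1 + 1) 1).map
          (fun x => pvPix A B C x y)) := by
  unfold rasterize0
  simp only []
  have hbody : (fun (out : List (List Int)) (y : Int) =>
      (PySem.List.pyRange (min (min A.1 B.1) C.1) (max (max A.1 B.1) C.1 + 1) 1).foldl (fun out x =>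
        if (x, y) = A ∨ (x, y) = B ∨ (x, y) = C then
          PySem.List.pySetD out (y - min (min A.2 B.2) C.2)
            (PySem.List.pySetD (PySem.List.pyGetD out (y - min (min A.2 B.2) C.2) []) (x - min (min A.1 B.1) C.1) 2)
        else
          let AP := (x - A.1, y - A.2)
          let BP := (x - B.1, y - B.2)
          let CP := (x - C.1, y - C.2)
          let APxBP := AP.1 * BP.2 - AP.2 * BP.1
          let BPxCP := BP.1 * CP.2 - BP.2 * CP.1
          let CPxAP := CP.1 * AP.2 - CP.2 * AP.1
          if APxBP ≥ 0 ∧ BPxCP ≥ 0 ∧ CPxAP ≥ 0 then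
            PySem.List.pySetD out (y - min (min A.2 B.2) C.2)
              (PySem.List.pySetD (PySem.List.pyGetD out (y - min (min A.2 B.2) C.2) []) (x - min (min A.1 B.1) C.1) 1)
          else
            PySem.List.pySetD out (y - min (min A.2 B.2) C.2)
              (PySem.List.pySetD (PySem.List.pyGetD out (y - min (min A.2 B.2) C.2) []) (x - min (min A.1 B.1) C.1) 0)) out)
      = (fun (out : List (List Int)) (y : Int) =>
      (PySem.List.pyRange (min (min A.1 B.1) C.1) (max (max A.1 B.1) C.1 + 1) 1).foldl (fun out x =>
        PySem.List.pySetD out (y - min (min A.2 B.2) C.2)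
          (PySem.List.pySetD (PySem.List.pyGetD out (y - min (min A.2 B.2) C.2) []) (x - min (min A.1 B.1) C.1)
            (pvPix A B C x y))) out) := by
    funext out y
    congr 1
    funext out x
    simp only [pvPix]
    split_ifs <;> rfl
  rw [hbody]
  apply List.ext_getElem?
  intro r
  rw [pvOuterFold_get (fun y x => pvPix A B C x y) (min (min A.1 B.1) C.1) (max (max A.1 B.1) C.1 + 1)
        (min (min A.2 B.2) C.2) (max (max A.2 B.2) C.2 + 1)
        (max (max A.2 B.2) C.2 + 1 - min (min A.2 B.2) C.2).toNat (min (min A.2 B.2) C.2) _ rfl le_rfl ?_ r]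
  · by_cases h : (r : Int) < max (max A.2 B.2) C.2 + 1 - min (min A.2 B.2) C.2
    · rw [if_pos (by omega)]
      conv_rhs => rw [List.getElem?_map, PySem.List.getElem?_pyRange_one]
      rw [if_pos (by omega)]
      rfl
    · rw [if_neg (by omega)]
      rw [List.getElem?_map, PySem.List.getElem?_pyRange_one, if_neg (by omega)]
      conv_rhs => rw [List.getElem?_map, PySem.List.getElem?_pyRange_one]
      rw [if_neg (by omega)]
      rfl
  · intro r' h1 h2
    rw [List.getElem?_map, PySem.List.getElem?_pyRange_one, if_pos (by omega)]
    rfl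

theorem pvB_eq_mid (A B C : Int × Int) :
    rasterize0_alt A B C =
      (PySem.List.pyRange (min (min A.2 B.2) C.2) (max (max A.2 B.2) C.2 + 1) 1).map (fun y =>
        (PySem.List.pyRange (min (min A.1 B.1) C.1) (max (max A.1 B.1) C.1 + 1) 1).map
          (fun x => pvPix A B C x y)) := by
  unfold rasterize0_alt
  refine List.map_congr_left ?_
  intro y hy
  refine List.map_congr_left ?_
  intro x hx
  rw [PySem.List.mem_pyRange_one] at hx
  simp only [List.foldl_cons, List.foldl_nil, pvPix]
  by_cases hv : (x, y) = A ∨ (x, y) = B ∨ (x, y) = C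
  · rw [if_pos hv, if_pos hv]
  · rw [if_neg hv, if_neg hv]
    split_ifs with hP hQ hQ
    · rfl
    · rw [pvClampStep, pvClampStep, pvClampStep] at hP
      obtain ⟨⟨⟨⟨-, -⟩, h1⟩, h2⟩, h3⟩ := hP
      exact absurd ⟨by nlinarith, by nlinarith, by nlinarith⟩ hQ
    · rw [pvClampStep, pvClampStep, pvClampStep] at hP
      obtain ⟨h1, h2, h3⟩ := hQ
      exact absurd ⟨⟨⟨⟨hx.1, by omega⟩, by nlinarith⟩, by nlinarith⟩, by nlinarith⟩ hP
    · rfl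

-- ===== VERDICT (by name: the statement is the Claim_ definition above) =====
theorem rasterize0_spec : Claim_equal_rasterize0 := by
  intro A B C _
  unfold Spec_rasterize0
  rw [pvA_eq_mid, pvB_eq_mid]
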